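-- pv_equiv track=rewrite | github.com/codeking01/python_project | Src/Python_project/Python_Task/Task/arithmetic/utils/writeToSmiles.py | get_insert_main_atom
-- ===== SOURCE A (Python) =====
-- def get_insert_main_atom(insert_atom=None):
--     """
--     :param insert_atom: 插入的列表
--     :return: 插入的列表的主原子长度
--     """
--     stack = []
--     for i in insert_atom:
--         if i == ')':
--             if i == '(':
--                 stack.pop()
--         else:
--             if len(stack) == 0 or stack[-1] != '(':
--                 stack.append(i)
--     return stack
-- ===== SOURCE B (Python) =====
-- def get_insert_main_atom(insert_atom=None):
--     res = [x for x in insert_atom if x != ')']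
--     if '(' in res:
--         return res[:res.index('(') + 1]
--     return res
-- ===== Notes on version B (the rewrite author's own statement) =====
-- stated objective: simpler
-- what changed: Replaces the stateful stack loop (where ')' is ignored and appending stops once '(' is on top) with a filter of ')' followed by truncation at and including the first '(', via index/slice.
import Mathlib
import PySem

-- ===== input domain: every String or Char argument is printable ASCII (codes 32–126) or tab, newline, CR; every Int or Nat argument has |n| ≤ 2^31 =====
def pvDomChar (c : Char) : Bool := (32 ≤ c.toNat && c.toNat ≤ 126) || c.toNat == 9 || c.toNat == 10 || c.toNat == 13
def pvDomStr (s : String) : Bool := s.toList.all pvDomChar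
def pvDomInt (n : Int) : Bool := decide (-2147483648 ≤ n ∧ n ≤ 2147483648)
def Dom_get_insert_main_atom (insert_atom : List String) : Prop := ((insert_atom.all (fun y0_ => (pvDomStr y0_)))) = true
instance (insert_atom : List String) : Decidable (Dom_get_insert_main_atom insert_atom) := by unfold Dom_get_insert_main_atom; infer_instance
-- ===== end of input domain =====

-- B replaces A's stateful stack loop by a filter of ')' plus truncation at (and including)
-- the first '(' — a simpler decomposition, same O(n) cost; return value only, no mutation.

-- ===== PORT A =====
-- the loop body of A, step for step (stack[-1] is only read when the stack is nonempty,
-- thanks to Python's short-circuit 'or'; getLastD "" is exact there)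
def pvStepA (stack : List String) (i : String) : List String :=
  if i = ")" then
    (if i = "(" then stack.dropLast else stack)
  else
    if stack.length = 0 ∨ stack.getLastD "" ≠ "(" then stack ++ [i] else stack

def get_insert_main_atom (insert_atom : List String) : List String :=
  insert_atom.foldl pvStepA []

-- ===== PORT B =====
def get_insert_main_atom_alt (insert_atom : List String) : List String :=
  let res := insert_atom.filter (fun x => x ≠ ")")
  if "(" ∈ res then res.take (res.idxOf "(" + 1) else res

-- ===== PRECONDITION & SPEC =====
def Spec_get_insert_main_atom (insert_atom : List String) (out : List String) : Prop := out = get_insert_main_atom_alt insert_atom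
instance (insert_atom : List String) (out : List String) : Decidable (Spec_get_insert_main_atom insert_atom out) := by unfold Spec_get_insert_main_atom; infer_instance

-- ===== CLAIM (what is proved, stated in full; the proofs are below) =====
def Claim_equal_get_insert_main_atom : Prop := ∀ (insert_atom : List String), Dom_get_insert_main_atom insert_atom → Spec_get_insert_main_atom insert_atom (get_insert_main_atom insert_atom)

-- ===== LEMMAS AND PROOFS =====

-- once the stack's last element is "(", A's loop changes nothing
theorem pv_fold_stop (l : List String) (t : List String) :
    List.foldl pvStepA (t ++ ["("]) l = t ++ ["("] := by
  induction l with
  | nil => rfl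
  | cons i l ih =>
    have h : pvStepA (t ++ ["("]) i = t ++ ["("] := by
      unfold pvStepA
      by_cases hi : i = ")"
      · simp [hi]
      · simp [hi]
    simp [List.foldl, h, ih]

theorem pv_alt_nil : get_insert_main_atom_alt [] = [] := by rfl

theorem pv_alt_rpar (l : List String) :
    get_insert_main_atom_alt (")" :: l) = get_insert_main_atom_alt l := by
  simp [get_insert_main_atom_alt]

theorem pv_alt_lpar (l : List String) :
    get_insert_main_atom_alt ("(" :: l) = ["("] := by
  simp [get_insert_main_atom_alt]

theorem pv_alt_other (i : String) (l : List String) (h1 : i ≠ ")") (h2 : i ≠ "(") :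
    get_insert_main_atom_alt (i :: l) = i :: get_insert_main_atom_alt l := by
  have hf : (i :: l).filter (fun x => x ≠ ")") = i :: l.filter (fun x => x ≠ ")") := by
    simp [h1]
  simp only [get_insert_main_atom_alt, hf]
  by_cases hm : "(" ∈ l.filter (fun x => x ≠ ")")
  · rw [if_pos (List.mem_cons_of_mem _ hm), if_pos hm,
      List.idxOf_cons_ne _ h2, List.take_succ_cons]
  · have hl : "(" ∉ l := by simpa using hm
    rw [if_neg (by simp [hl, Ne.symm h2]), if_neg hm]

-- invariant: from a stack not containing "(", A's loop returns stack ++ B's answer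
theorem pv_fold_inv (l : List String) (s : List String) (hs : "(" ∉ s) :
    List.foldl pvStepA s l = s ++ get_insert_main_atom_alt l := by
  induction l generalizing s with
  | nil => simp [pv_alt_nil]
  | cons i l ih =>
    by_cases h1 : i = ")"
    · subst h1
      have hstep : pvStepA s ")" = s := by unfold pvStepA; simp
      simp [List.foldl, hstep, pv_alt_rpar, ih s hs]
    · have hlast : s.length = 0 ∨ s.getLastD "" ≠ "(" := by
        cases s with
        | nil => exact Or.inl rfl
        | cons a t =>
          right
          have he : (a :: t).getLastD "" = (a :: t).getLast (by simp) := by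
            simp [List.getLastD_eq_getLast?, List.getLast?_eq_some_getLast]
          rw [he]
          intro hc
          exact hs (hc ▸ List.getLast_mem (l := a :: t) (by simp))
      have hstep : pvStepA s i = s ++ [i] := by
        unfold pvStepA
        rw [if_neg h1, if_pos hlast]
      by_cases h2 : i = "("
      · subst h2
        simp [List.foldl, hstep, pv_fold_stop, pv_alt_lpar]
      · have hs' : "(" ∉ s ++ [i] := by
          simp [hs, Ne.symm h2]
        simp [List.foldl, hstep, ih _ hs', pv_alt_other i l h1 h2]

-- ===== VERDICT (by name: the statement is the Claim_ definition above) =====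
theorem get_insert_main_atom_spec : Claim_equal_get_insert_main_atom := by
  intro l _
  show get_insert_main_atom l = get_insert_main_atom_alt l
  simpa using pv_fold_inv l [] (by simp)
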